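-- pv_equiv track=rewrite | github.com/TroubledDreamer/Unlucky_Years | Unlucky_Years/Unlucky_Years.py | mostUnlucky
-- ===== SOURCE A (Python) =====
-- def mostUnlucky(start_year, end_year):
--     # Write your code here
--     day_names = ['Monday','Tuesday','Wednesday','Thursday','Friday','Saturday','Sunday']
--
--     def day_of_week(d,m,y):
--         if m == 1 or m == 2:
--             m += 12
--             y -= 1
--
--         day = int(((13 * m + 3) // 5 + d + y + (y // 4) - (y // 100) + (y // 400)) % 7)
--         return day_names[day]
--     def unlucky(year):
--
--         date_list = [(y, x, year) for x in range(1,13) for y in range(1,32) if day_of_week(13, x, year) == 'Friday' and y == 13]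
--
--         return date_list
--
--     end_year += 1
--     year_list = [x for x in range(start_year,end_year) if len(unlucky(x)) > 2]
--     return year_list
-- ===== SOURCE B (Python) =====
-- def mostUnlucky(start_year, end_year):
--     # Running-weekday sweep: compute the Jan-13 weekday of start_year once,
--     # then advance month by month, counting Friday-the-13ths per year.
--     MONTH_LEN = [31, 28, 31, 30, 31, 30, 31, 31, 30, 31, 30, 31]
--     y = start_year - 1  # Jan maps to month 13 of the previous year in the anchor formula
--     w = ((13 * 13 + 3) // 5 + 13 + y + y // 4 - y // 100 + y // 400) % 7
--     result = []
--     for year in range(start_year, end_year + 1):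
--         leap = year % 4 == 0 and (year % 100 != 0 or year % 400 == 0)
--         fridays = 0
--         for i in range(12):
--             if w == 4:
--                 fridays += 1
--             w = (w + MONTH_LEN[i] + (1 if leap and i == 1 else 0)) % 7
--         if fridays > 2:
--             result.append(year)
--     return result
-- ===== Notes on version B (the rewrite author's own statement) =====
-- stated objective: alternative
-- what changed: A recomputes a closed-form Zeller-style weekday independently for every (month, year) inside a 12x31 comprehension per year; B computes the Jan-13 weekday of start_year once and sweeps every month with a running weekday offset advanced by month lengths (with an explicit leap rule), counting Friday-the-13ths per year.
import Mathlib
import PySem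

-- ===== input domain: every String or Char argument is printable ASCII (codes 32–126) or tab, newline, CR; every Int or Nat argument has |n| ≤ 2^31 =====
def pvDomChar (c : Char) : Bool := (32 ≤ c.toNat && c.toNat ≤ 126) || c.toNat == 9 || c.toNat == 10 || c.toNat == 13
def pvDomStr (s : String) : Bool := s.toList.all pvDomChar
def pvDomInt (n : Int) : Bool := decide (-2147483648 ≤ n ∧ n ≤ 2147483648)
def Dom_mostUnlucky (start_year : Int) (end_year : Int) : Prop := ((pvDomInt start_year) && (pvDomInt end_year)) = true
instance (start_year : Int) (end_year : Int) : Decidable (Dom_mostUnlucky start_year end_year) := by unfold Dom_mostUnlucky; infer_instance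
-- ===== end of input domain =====

-- B replaces A's per-month closed-form weekday (recomputed inside a 12×31 comprehension per year)
-- by a single Jan-13 anchor for start_year and a running weekday offset swept month by month; objective: alternative.

-- ===== PORT A =====
def pvDayNames : List String :=
  ["Monday", "Tuesday", "Wednesday", "Thursday", "Friday", "Saturday", "Sunday"]

def pvDayOfWeek (d : Int) (m : Int) (y : Int) : String :=
  let p := if m == 1 || m == 2 then (m + 12, y - 1) else (m, y)
  let day := PySem.Int.mod (PySem.Int.floordiv (13 * p.1 + 3) 5 + d + p.2 +
      PySem.Int.floordiv p.2 4 - PySem.Int.floordiv p.2 100 + PySem.Int.floordiv p.2 400) 7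
  -- day ∈ [0,7), so the Python indexing day_names[day] never raises; getD "" is exact here
  (PySem.List.pyGet? pvDayNames day).getD ""

def pvUnlucky (year : Int) : List (Int × Int × Int) :=
  (PySem.List.pyRange 1 13 1).flatMap (fun x =>
    ((PySem.List.pyRange 1 32 1).filter
        (fun y => (pvDayOfWeek 13 x year == "Friday") && (y == 13))).map
      (fun y => (y, x, year)))

def mostUnlucky (start_year : Int) (end_year : Int) : List Int :=
  let end_year := end_year + 1
  (PySem.List.pyRange start_year end_year 1).filter (fun x => (pvUnlucky x).length > 2)

-- ===== PORT B =====
def pvMonthLen : List Int := [31, 28, 31, 30, 31, 30, 31, 31, 30, 31, 30, 31]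

def pvLeap (year : Int) : Bool :=
  PySem.Int.mod year 4 == 0 && (!(PySem.Int.mod year 100 == 0) || PySem.Int.mod year 400 == 0)

-- body of Source B's inner `for i in range(12)` loop; state = (w, fridays)
def pvInnerStep (leap : Bool) (p : Int × Int) (i : Int) : Int × Int :=
  let fridays := if p.1 == 4 then p.2 + 1 else p.2
  -- i ∈ [0,12), so MONTH_LEN[i] never raises; getD 0 is exact here
  let w := PySem.Int.mod (p.1 + (PySem.List.pyGet? pvMonthLen i).getD 0 +
      (if leap && i == 1 then 1 else 0)) 7
  (w, fridays)

-- body of Source B's outer `for year in range(...)` loop; state = (w, result)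
def pvYearStep (st : Int × List Int) (year : Int) : Int × List Int :=
  let leap := pvLeap year
  let inner := (PySem.List.pyRange 0 12 1).foldl (pvInnerStep leap) (st.1, 0)
  (inner.1, if inner.2 > 2 then st.2 ++ [year] else st.2)

def mostUnlucky_alt (start_year : Int) (end_year : Int) : List Int :=
  let y := start_year - 1
  let w := PySem.Int.mod (PySem.Int.floordiv (13 * 13 + 3) 5 + 13 + y +
      PySem.Int.floordiv y 4 - PySem.Int.floordiv y 100 + PySem.Int.floordiv y 400) 7
  ((PySem.List.pyRange start_year (end_year + 1) 1).foldl pvYearStep (w, [])).2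

-- ===== PRECONDITION & SPEC =====
def Spec_mostUnlucky (start_year : Int) (end_year : Int) (out : List Int) : Prop := out = mostUnlucky_alt start_year end_year
instance (start_year : Int) (end_year : Int) (out : List Int) : Decidable (Spec_mostUnlucky start_year end_year out) := by unfold Spec_mostUnlucky; infer_instance

-- ===== CLAIM (what is proved, stated in full; the proofs are below) =====
def Claim_equal_mostUnlucky : Prop := ∀ (start_year : Int) (end_year : Int), Dom_mostUnlucky start_year end_year → Spec_mostUnlucky start_year end_year (mostUnlucky start_year end_year)

-- ===== LEMMAS AND PROOFS =====

-- A's weekday-index formula, specialised to d = 13 (the only d A ever passes)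
def pvF (m y : Int) : Int :=
  PySem.Int.mod (PySem.Int.floordiv (13 * m + 3) 5 + 13 + y +
    PySem.Int.floordiv y 4 - PySem.Int.floordiv y 100 + PySem.Int.floordiv y 400) 7

-- weekday index of Jan 13 of `year` (= B's running w at the start of that year)
def pvAnchor (year : Int) : Int := pvF 13 (year - 1)

theorem pvF_emod (m y : Int) :
    pvF m y = ((13 * m + 3) / 5 + 13 + y + y / 4 - y / 100 + y / 400) % 7 := by
  unfold pvF
  rw [PySem.Int.mod_eq_emod_of_pos (show (0:Int) < 7 by norm_num),
      PySem.Int.floordiv_eq_ediv_of_pos (show (0:Int) < 5 by norm_num),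
      PySem.Int.floordiv_eq_ediv_of_pos (show (0:Int) < 4 by norm_num),
      PySem.Int.floordiv_eq_ediv_of_pos (show (0:Int) < 100 by norm_num),
      PySem.Int.floordiv_eq_ediv_of_pos (show (0:Int) < 400 by norm_num)]

theorem pvF_bounds (m y : Int) : 0 ≤ pvF m y ∧ pvF m y < 7 := by
  rw [pvF_emod]; omega

-- one month of B's sweep, in canonical form
theorem step_eq (L : Bool) (w c i : Int) :
    pvInnerStep L (w, c) i =
      (PySem.Int.mod (w + ((PySem.List.pyGet? pvMonthLen i).getD 0 +
          (if L && i == 1 then 1 else 0))) 7,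
       c + (if w = 4 then 1 else 0)) := by
  simp [pvInnerStep, add_assoc]
  split_ifs <;> ring

theorem pvLeap_iff (year : Int) :
    pvLeap year = true ↔ (year % 4 = 0 ∧ (¬ year % 100 = 0 ∨ year % 400 = 0)) := by
  unfold pvLeap
  rw [PySem.Int.mod_eq_emod_of_pos (show (0:Int) < 4 by norm_num),
      PySem.Int.mod_eq_emod_of_pos (show (0:Int) < 100 by norm_num),
      PySem.Int.mod_eq_emod_of_pos (show (0:Int) < 400 by norm_num)]
  simp

theorem chainFeb (year : Int) :
    PySem.Int.mod (pvF 14 (year - 1) + (28 + (if pvLeap year = true then 1 else 0))) 7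
      = pvF 3 year := by
  rw [pvF_emod, pvF_emod, PySem.Int.mod_eq_emod_of_pos (show (0:Int) < 7 by norm_num)]
  by_cases hL : pvLeap year = true
  · rw [if_pos hL]; rw [pvLeap_iff] at hL
    obtain ⟨h4, h100⟩ := hL
    have e1 : (year - 1) / 4 = year / 4 - 1 := by omega
    rcases h100 with h100 | h400
    · have h400 : ¬ year % 400 = 0 := by omega
      have e2 : (year - 1) / 100 = year / 100 := by omega
      have e3 : (year - 1) / 400 = year / 400 := by omega
      rw [e1, e2, e3]; omega
    · have h100 : year % 100 = 0 := by omega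
      have e2 : (year - 1) / 100 = year / 100 - 1 := by omega
      have e3 : (year - 1) / 400 = year / 400 - 1 := by omega
      rw [e1, e2, e3]; omega
  · rw [if_neg hL]; rw [pvLeap_iff] at hL
    by_cases h4 : year % 4 = 0
    · have h1 : year % 100 = 0 ∧ ¬ year % 400 = 0 := by
        by_contra hc
        exact hL ⟨h4, by tauto⟩
      have e1 : (year - 1) / 4 = year / 4 - 1 := by omega
      have e2 : (year - 1) / 100 = year / 100 - 1 := by omega
      have e3 : (year - 1) / 400 = year / 400 := by omega
      rw [e1, e2, e3]; omega
    · have h100 : ¬ year % 100 = 0 := by omega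
      have h400 : ¬ year % 400 = 0 := by omega
      have e1 : (year - 1) / 4 = year / 4 := by omega
      have e2 : (year - 1) / 100 = year / 100 := by omega
      have e3 : (year - 1) / 400 = year / 400 := by omega
      rw [e1, e2, e3]; omega

-- weekday chain: all months except February
theorem chainM (m m' len y : Int) (hm' : m' = m + 1)
    (hlen : len = PySem.Int.floordiv (13 * m' + 3) 5 - PySem.Int.floordiv (13 * m + 3) 5 + 28) :
    PySem.Int.mod (pvF m y + len) 7 = pvF m' y := by
  subst hm'
  rw [pvF_emod, pvF_emod, PySem.Int.mod_eq_emod_of_pos (show (0:Int) < 7 by norm_num),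
      PySem.Int.floordiv_eq_ediv_of_pos (show (0:Int) < 5 by norm_num),
      PySem.Int.floordiv_eq_ediv_of_pos (show (0:Int) < 5 by norm_num)] at *
  omega

theorem getD_friday (k : Int) (h0 : 0 ≤ k) (h7 : k < 7) :
    ((PySem.List.pyGet? pvDayNames k).getD "" == "Friday") = (k == 4) := by
  interval_cases k <;> decide

theorem dow_friday (m y : Int) :
    (pvDayOfWeek 13 m y == "Friday")
      = ((if m == 1 || m == 2 then pvF (m + 12) (y - 1) else pvF m y) == 4) := by
  unfold pvDayOfWeek
  by_cases hm : (m == 1 || m == 2) = true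
  · rw [if_pos hm, if_pos hm]
    exact getD_friday _ (pvF_bounds _ _).1 (pvF_bounds _ _).2
  · rw [if_neg hm, if_neg hm]
    exact getD_friday _ (pvF_bounds _ _).1 (pvF_bounds _ _).2

theorem filter_len (b : Bool) :
    ((PySem.List.pyRange 1 32 1).filter (fun y => b && (y == 13))).length
      = if b then 1 else 0 := by
  cases b <;> decide

theorem len_unlucky (year : Int) :
    ((pvUnlucky year).length : Int)
      = (if pvF 13 (year - 1) = 4 then 1 else 0) + (if pvF 14 (year - 1) = 4 then 1 else 0)
        + (if pvF 3 year = 4 then 1 else 0) + (if pvF 4 year = 4 then 1 else 0)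
        + (if pvF 5 year = 4 then 1 else 0) + (if pvF 6 year = 4 then 1 else 0)
        + (if pvF 7 year = 4 then 1 else 0) + (if pvF 8 year = 4 then 1 else 0)
        + (if pvF 9 year = 4 then 1 else 0) + (if pvF 10 year = 4 then 1 else 0)
        + (if pvF 11 year = 4 then 1 else 0) + (if pvF 12 year = 4 then 1 else 0) := by
  have hr : PySem.List.pyRange 1 13 1 = [1,2,3,4,5,6,7,8,9,10,11,12] := by decide
  unfold pvUnlucky
  rw [hr]
  simp only [List.flatMap_cons, List.flatMap_nil, List.append_nil, List.length_append,
    List.length_map, dow_friday, filter_len]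
  norm_num
  ring

theorem inner_eq (year : Int) :
    (PySem.List.pyRange 0 12 1).foldl (pvInnerStep (pvLeap year)) (pvAnchor year, 0)
      = (pvAnchor (year + 1), ((pvUnlucky year).length : Int)) := by
  have hr : PySem.List.pyRange 0 12 1 = [0,1,2,3,4,5,6,7,8,9,10,11] := by decide
  have g0 : (PySem.List.pyGet? pvMonthLen (0:Int)).getD 0 = 31 := by decide
  have g1 : (PySem.List.pyGet? pvMonthLen (1:Int)).getD 0 = 28 := by decide
  have g2 : (PySem.List.pyGet? pvMonthLen (2:Int)).getD 0 = 31 := by decide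
  have g3 : (PySem.List.pyGet? pvMonthLen (3:Int)).getD 0 = 30 := by decide
  have g4 : (PySem.List.pyGet? pvMonthLen (4:Int)).getD 0 = 31 := by decide
  have g5 : (PySem.List.pyGet? pvMonthLen (5:Int)).getD 0 = 30 := by decide
  have g6 : (PySem.List.pyGet? pvMonthLen (6:Int)).getD 0 = 31 := by decide
  have g7 : (PySem.List.pyGet? pvMonthLen (7:Int)).getD 0 = 31 := by decide
  have g8 : (PySem.List.pyGet? pvMonthLen (8:Int)).getD 0 = 30 := by decide
  have g9 : (PySem.List.pyGet? pvMonthLen (9:Int)).getD 0 = 31 := by decide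
  have g10 : (PySem.List.pyGet? pvMonthLen (10:Int)).getD 0 = 30 := by decide
  have g11 : (PySem.List.pyGet? pvMonthLen (11:Int)).getD 0 = 31 := by decide
  rw [hr]
  simp only [List.foldl_cons, List.foldl_nil, step_eq, g0, g1, g2, g3, g4, g5, g6, g7, g8, g9,
    g10, g11, show ((0:Int) == 1) = false from by decide, show ((1:Int) == 1) = true from by decide, show ((2:Int) == 1) = false from by decide, show ((3:Int) == 1) = false from by decide, show ((4:Int) == 1) = false from by decide, show ((5:Int) == 1) = false from by decide, show ((6:Int) == 1) = false from by decide, show ((7:Int) == 1) = false from by decide, show ((8:Int) == 1) = false from by decide, show ((9:Int) == 1) = false from by decide, show ((10:Int) == 1) = false from by decide, show ((11:Int) == 1) = false from by decide, Bool.and_false, Bool.and_true, Bool.false_eq_true, if_false, add_zero]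
  rw [show pvAnchor year = pvF 13 (year - 1) from rfl]
  rw [chainM 13 14 31 (year - 1) (by norm_num) (by decide)]
  rw [chainFeb year]
  rw [chainM 3 4 31 year (by norm_num) (by decide)]
  rw [chainM 4 5 30 year (by norm_num) (by decide)]
  rw [chainM 5 6 31 year (by norm_num) (by decide)]
  rw [chainM 6 7 30 year (by norm_num) (by decide)]
  rw [chainM 7 8 31 year (by norm_num) (by decide)]
  rw [chainM 8 9 31 year (by norm_num) (by decide)]
  rw [chainM 9 10 30 year (by norm_num) (by decide)]
  rw [chainM 10 11 31 year (by norm_num) (by decide)]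
  rw [chainM 11 12 30 year (by norm_num) (by decide)]
  rw [chainM 12 13 31 year (by norm_num) (by decide)]
  rw [len_unlucky]
  simp only [Prod.mk.injEq]
  constructor
  · show pvF 13 year = pvF 13 (year + 1 - 1)
    norm_num
  · ring

theorem yearStep_eq (year : Int) (acc : List Int) :
    pvYearStep (pvAnchor year, acc) year
      = (pvAnchor (year + 1), if (pvUnlucky year).length > 2 then acc ++ [year] else acc) := by
  simp only [pvYearStep]
  rw [inner_eq]
  dsimp only
  by_cases h : (pvUnlucky year).length > 2
  · rw [if_pos (by exact_mod_cast h), if_pos h]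
  · rw [if_neg (by exact_mod_cast h), if_neg h]

theorem loop (n : Nat) (s : Int) (acc : List Int) :
    ((List.range n).map (fun (k : Nat) => s + (k : Int))).foldl pvYearStep (pvAnchor s, acc)
      = (pvAnchor (s + n),
         acc ++ ((List.range n).map (fun (k : Nat) => s + (k : Int))).filter
           (fun x => (pvUnlucky x).length > 2)) := by
  induction n with
  | zero => simp
  | succ n ih =>
      rw [List.range_succ, List.map_append, List.foldl_append, List.filter_append, ih]
      simp only [List.map_cons, List.map_nil, List.foldl_cons, List.foldl_nil, List.filter_cons,
        List.filter_nil]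
      rw [yearStep_eq]
      have ha : pvAnchor (s + ↑n + 1) = pvAnchor (s + ↑(n + 1)) := by push_cast; ring_nf
      by_cases h : (pvUnlucky (s + ↑n)).length > 2
      · rw [if_pos h, if_pos (by simpa using h)]
        simp [ha, List.append_assoc]
      · rw [if_neg h, if_neg (by simpa using h)]
        simp [ha]

theorem mostUnlucky_spec : Claim_equal_mostUnlucky := by
  intro s e _
  unfold Spec_mostUnlucky mostUnlucky mostUnlucky_alt
  dsimp only
  rw [show PySem.Int.mod (PySem.Int.floordiv (13 * 13 + 3) 5 + 13 + (s - 1) +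
      PySem.Int.floordiv (s - 1) 4 - PySem.Int.floordiv (s - 1) 100 +
      PySem.Int.floordiv (s - 1) 400) 7 = pvAnchor s from rfl]
  rw [PySem.List.pyRange_one]
  rw [loop]
  simp
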